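-- pv_equiv track=rewrite | github.com/robingenz/advent-of-code | 2020/20/code.py | match_hashes
-- ===== SOURCE A (Python) =====
-- from itertools import combinations
--
-- def match_hashes(hashes: dict) -> dict:
--     matches = dict()
--     for (x, y), (i, j) in combinations(hashes.items(), 2):
--         result = y.intersection(j)
--         if result:
--             matches[x] = matches.get(x, []) + [i]
--             matches[i] = matches.get(i, []) + [x]
--     for k, v in matches.items():
--         matches[k] = set(v)
--     return matches
-- ===== SOURCE B (Python) =====
-- def match_hashes(hashes: dict) -> dict:
--     matches = {}
--     for x, y in hashes.items():
--         partners = {k for k, s in hashes.items() if k != x and y & s}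
--         if partners:
--             matches[x] = partners
--     return matches
-- ===== Notes on version B (the rewrite author's own statement) =====
-- stated objective: simpler
-- what changed: A accumulates symmetric pairwise matches over itertools.combinations into a dict of lists (per-pair dict.get + list concatenation, which recopies the growing lists) and then runs a second pass converting every list to a set; B computes each key's partner set directly with one comprehension per key and writes it into the result in a single pass, with no intermediate lists and no conversion pass. Pre_ excludes association lists with duplicate keys (they denote no Python dict) and inputs on which A's accidental dict insertion order (pair-discovery order) diverges from the input key order.
import Mathlib
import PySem

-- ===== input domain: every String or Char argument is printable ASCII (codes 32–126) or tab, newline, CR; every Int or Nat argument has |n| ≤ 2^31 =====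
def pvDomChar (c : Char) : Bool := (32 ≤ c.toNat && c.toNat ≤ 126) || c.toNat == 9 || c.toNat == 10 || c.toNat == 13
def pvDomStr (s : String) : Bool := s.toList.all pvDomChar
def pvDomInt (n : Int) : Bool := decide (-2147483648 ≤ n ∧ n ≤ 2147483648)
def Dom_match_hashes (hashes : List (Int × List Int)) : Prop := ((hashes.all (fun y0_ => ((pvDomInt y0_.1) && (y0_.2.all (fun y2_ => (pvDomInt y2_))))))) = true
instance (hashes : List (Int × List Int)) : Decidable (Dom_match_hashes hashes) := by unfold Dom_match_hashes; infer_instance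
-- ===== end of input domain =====

-- B replaces A's pairwise accumulation (combinations + symmetric per-pair get/concat + a second
-- list-to-set pass) by one direct pass: for each key, its partner set is a single comprehension
-- over the items, written into the result at once (simpler; no asymptotic change).

-- ===== PORT A =====
-- itertools.combinations(xs, 2) as a list of pairs
def pvCombos2 {α : Type} (xs : List α) : List (α × α) :=
  (PySem.List.combinations xs 2).filterMap (fun c =>
    match c with
    | [a, b] => some (a, b)
    | _ => none)

def match_hashes (hashes : List (Int × List Int)) : List (Int × List Int) :=
  let pms : PySem.Dict Int (List Int) :=
    (pvCombos2 hashes).foldl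
      (fun m pq =>
        let result := PySem.Set.inter pq.1.2 pq.2.2
        if result ≠ [] then
          let m1 := m.insert pq.1.1 (m.getD pq.1.1 [] ++ [pq.2.1])
          m1.insert pq.2.1 (m1.getD pq.2.1 [] ++ [pq.1.1])
        else m)
      PySem.Dict.empty
  (pms.items.foldl (fun m kv => m.insert kv.1 (PySem.Set.ofList kv.2)) pms).items

-- ===== PORT B =====
def match_hashes_alt (hashes : List (Int × List Int)) : List (Int × List Int) :=
  (hashes.foldl
    (fun m p =>
      let partners := PySem.Set.ofList
        ((hashes.filter (fun q => q.1 != p.1 && (PySem.Set.inter p.2 q.2 != []))).map Prod.fst)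
      if partners ≠ [] then m.insert p.1 partners else m)
    PySem.Dict.empty).items

-- ===== PRECONDITION & SPEC =====
-- q is a match partner of p (distinct key, overlapping hash sets)
def pvR (p q : Int × List Int) : Bool := q.1 != p.1 && (PySem.Set.inter p.2 q.2 != [])

-- "no inversion": no matched key j gets its first matching pair (i,k), i < j < k, discovered
-- before j's own first pair, i.e. A's dict insertion order agrees with the input key order
def pvNoInvB (hashes : List (Int × List Int)) : Bool :=
  (List.range hashes.length).all fun k =>
    (List.range k).all fun j =>
      (List.range j).all fun i =>
        !(pvR hashes[i]! hashes[k]!) ||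
        !((List.range hashes.length).any fun l => pvR hashes[j]! hashes[l]!) ||
        ((List.range (i + 1)).any fun l => pvR hashes[l]! hashes[j]!)

-- Pre_ excludes association lists with duplicate keys (they do not denote any Python dict) and
-- inputs on which A's accidental dict insertion order (the order matching pairs are discovered)
-- diverges from the input key order; which of the two orders the result carries is unspecified.
def Pre_match_hashes (hashes : List (Int × List Int)) : Prop :=
  (hashes.map Prod.fst).Nodup ∧ pvNoInvB hashes = true
instance (hashes : List (Int × List Int)) : Decidable (Pre_match_hashes hashes) := by
  unfold Pre_match_hashes; infer_instance

def pvWitness_match_hashes : (List (Int × List Int)) := [(1, [1]), (2, [1, 2]), (3, [5])]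

def Spec_match_hashes (hashes : List (Int × List Int)) (out : List (Int × List Int)) : Prop := out = match_hashes_alt hashes
instance (hashes : List (Int × List Int)) (out : List (Int × List Int)) : Decidable (Spec_match_hashes hashes out) := by unfold Spec_match_hashes; infer_instance

-- ===== CLAIM (what is proved, stated in full; the proofs are below) =====
def Claim_equal_match_hashes : Prop := ∀ (hashes : List (Int × List Int)), Dom_match_hashes hashes → Pre_match_hashes hashes → Spec_match_hashes hashes (match_hashes hashes)

-- ===== LEMMAS AND PROOFS =====

-- `y.intersection(j)` is non-empty
def pvMat (p q : Int × List Int) : Bool := PySem.Set.inter p.2 q.2 != []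

-- values of the events with key k, in order
def pvSel (k : Int) (evs : List (Int × Int)) : List Int :=
  (evs.filter (fun e => e.1 == k)).map (·.2)

-- first-occurrence grouping of events whose key is not yet seen
def pvGrp (seen : List Int) : List (Int × Int) → List (Int × List Int)
  | [] => []
  | e :: evs => if e.1 ∈ seen then pvGrp seen evs
                else (e.1, e.2 :: pvSel e.1 evs) :: pvGrp (e.1 :: seen) evs

-- first occurrences not yet seen
def pvUniq (seen : List Int) : List Int → List Int
  | [] => []
  | k :: ks => if k ∈ seen then pvUniq seen ks else k :: pvUniq (k :: seen) ks

-- the (dict-key, appended-value) events of A's main loop, in order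
def pvEvents (items : List (Int × List Int)) : List (Int × Int) :=
  ((pvCombos2 items).filter (fun pq => pvMat pq.1 pq.2)).flatMap
    (fun pq => [(pq.1.1, pq.2.1), (pq.2.1, pq.1.1)])

-- the partner-key list B computes for entry p
def pvNbrList (items : List (Int × List Int)) (p : Int × List Int) : List Int :=
  (items.filter (fun q => q.1 != p.1 && (PySem.Set.inter p.2 q.2 != []))).map Prod.fst

-- A's accumulation step, one event at a time
def pvGather (evs : List (Int × Int)) (m : PySem.Dict Int (List Int)) : PySem.Dict Int (List Int) :=
  evs.foldl (fun m e => m.insert e.1 (m.getD e.1 [] ++ [e.2])) m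

lemma pvCombos2_nil {α : Type} : pvCombos2 ([] : List α) = [] := by
  simp [pvCombos2, PySem.List.combinations_nil_succ]

lemma pvCombos2_cons {α : Type} (x : α) (xs : List α) :
    pvCombos2 (x :: xs) = xs.map (fun b => (x, b)) ++ pvCombos2 xs := by
  simp [pvCombos2, PySem.List.combinations_cons_succ, PySem.List.combinations_one,
    List.filterMap_append, List.filterMap_map, Function.comp]

lemma pvEvents_nil : pvEvents [] = [] := by simp [pvEvents, pvCombos2_nil]

lemma pvEvents_cons (p : Int × List Int) (rest : List (Int × List Int)) :
    pvEvents (p :: rest) =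
      ((rest.filter (pvMat p)).flatMap (fun q => [(p.1, q.1), (q.1, p.1)])) ++ pvEvents rest := by
  simp only [pvEvents, pvCombos2_cons, List.filter_append, List.flatMap_append, List.filter_map,
    List.flatMap_map, Function.comp_def, pvMat]
  rfl

lemma pvInterNil_symm (u w : List Int) (h : PySem.Set.inter u w = []) :
    PySem.Set.inter w u = [] := by
  rcases List.eq_nil_or_concat (PySem.Set.inter w u) with h2 | ⟨l, x, h2⟩
  · exact h2
  · exfalso
    have hx : x ∈ PySem.Set.inter w u := by simp [h2]
    rw [PySem.Set.mem_inter] at hx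
    have hx2 : x ∈ PySem.Set.inter u w := by rw [PySem.Set.mem_inter]; exact ⟨hx.2, hx.1⟩
    simp [h] at hx2

lemma pvMat_symm (p q : Int × List Int) : pvMat p q = pvMat q p := by
  unfold pvMat
  rw [Bool.eq_iff_iff]
  simp only [bne_iff_ne, ne_eq]
  exact not_congr ⟨fun h => pvInterNil_symm _ _ h, fun h => pvInterNil_symm _ _ h⟩

lemma pvR_symm (p q : Int × List Int) : pvR p q = pvR q p := by
  unfold pvR
  rw [Bool.eq_iff_iff]
  simp only [Bool.and_eq_true, bne_iff_ne, ne_eq]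
  constructor
  · rintro ⟨h1, h2⟩
    exact ⟨fun h => h1 h.symm, fun h => h2 (pvInterNil_symm _ _ h)⟩
  · rintro ⟨h1, h2⟩
    exact ⟨fun h => h1 h.symm, fun h => h2 (pvInterNil_symm _ _ h)⟩

lemma pvR_self (p : Int × List Int) : pvR p p = false := by simp [pvR]

lemma pvR_eq_pvMat (p q : Int × List Int) (h : q.1 ≠ p.1) : pvR p q = pvMat p q := by
  simp [pvR, pvMat, h]

-- keys appearing in events are keys of items
lemma pvEvents_keys_sub (items : List (Int × List Int)) (e : Int × Int)
    (he : e ∈ pvEvents items) : e.1 ∈ items.map Prod.fst := by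
  induction items with
  | nil => simp [pvEvents_nil] at he
  | cons p rest ih =>
    rw [pvEvents_cons] at he
    rcases List.mem_append.1 he with h | h
    · simp only [List.mem_flatMap, List.mem_filter] at h
      obtain ⟨q, ⟨hq, -⟩, he'⟩ := h
      have hq1 : q.1 ∈ (p :: rest).map Prod.fst :=
        List.mem_map_of_mem (List.mem_cons_of_mem _ hq)
      simp only [List.mem_cons, List.not_mem_nil, or_false] at he'
      rcases he' with h1 | h1 <;> rw [h1]
      · simp
      · exact hq1
    · have := ih h
      simp at this ⊢
      tauto

lemma pvSel_append (k : Int) (a b : List (Int × Int)) :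
    pvSel k (a ++ b) = pvSel k a ++ pvSel k b := by
  simp [pvSel, List.filter_append]

lemma pvUniq_congr (seen seen' : List Int) (l : List Int)
    (h : ∀ x, x ∈ seen ↔ x ∈ seen') : pvUniq seen l = pvUniq seen' l := by
  induction l generalizing seen seen' with
  | nil => simp [pvUniq]
  | cons k ks ih =>
    simp only [pvUniq]
    by_cases hk : k ∈ seen'
    · rw [if_pos ((h k).2 hk), if_pos hk]; exact ih _ _ h
    · rw [if_neg (fun hh => hk ((h k).1 hh)), if_neg hk,
        ih (k :: seen) (k :: seen') (by intro x; simp [h x])]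

lemma pvGrp_congr (seen seen' : List Int) (evs : List (Int × Int))
    (h : ∀ x, x ∈ seen ↔ x ∈ seen') : pvGrp seen evs = pvGrp seen' evs := by
  induction evs generalizing seen seen' with
  | nil => simp [pvGrp]
  | cons e evs ih =>
    simp only [pvGrp]
    by_cases hk : e.1 ∈ seen'
    · rw [if_pos ((h e.1).2 hk), if_pos hk]; exact ih _ _ h
    · rw [if_neg (fun hh => hk ((h e.1).1 hh)), if_neg hk,
        ih (e.1 :: seen) (e.1 :: seen') (by intro x; simp [h x])]

lemma pvUniq_mem (seen : List Int) (l : List Int) (k : Int) (h : k ∈ pvUniq seen l) :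
    k ∈ l ∧ k ∉ seen := by
  induction l generalizing seen with
  | nil => simp [pvUniq] at h
  | cons k' ks ih =>
    simp only [pvUniq] at h
    by_cases hk : k' ∈ seen
    · rw [if_pos hk] at h
      have := ih seen h
      exact ⟨List.mem_cons_of_mem _ this.1, this.2⟩
    · rw [if_neg hk] at h
      rcases List.mem_cons.1 h with h1 | h1
      · subst h1; exact ⟨List.mem_cons_self, hk⟩
      · have := ih (k' :: seen) h1
        exact ⟨List.mem_cons_of_mem _ this.1, fun hc => this.2 (List.mem_cons_of_mem _ hc)⟩

lemma pvUniq_append (seen a t : List Int) :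
    pvUniq seen (a ++ t) = pvUniq seen a ++ pvUniq (a ++ seen) t := by
  induction a generalizing seen with
  | nil => simp [pvUniq]
  | cons k ks ih =>
    simp only [List.cons_append, pvUniq]
    by_cases hk : k ∈ seen
    · have hc := pvUniq_congr (ks ++ seen) (k :: (ks ++ seen)) t
        (by intro x
            simp only [List.mem_cons, List.mem_append]
            constructor
            · tauto
            · rintro (rfl | h)
              · exact Or.inr hk
              · exact h)
      rw [if_pos hk, if_pos hk, ih seen, hc]
    · have hc := pvUniq_congr (ks ++ k :: seen) (k :: (ks ++ seen)) t
        (by intro x; simp only [List.mem_cons, List.mem_append]; tauto)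
      rw [if_neg hk, if_neg hk, ih (k :: seen), hc]
      simp [List.cons_append]

lemma pvGrp_eq_uniq (seen : List Int) (evs : List (Int × Int)) :
    pvGrp seen evs = (pvUniq seen (evs.map Prod.fst)).map (fun k => (k, pvSel k evs)) := by
  induction evs generalizing seen with
  | nil => simp [pvGrp, pvUniq]
  | cons e evs ih =>
    simp only [pvGrp, List.map_cons, pvUniq]
    by_cases hk : e.1 ∈ seen
    · rw [if_pos hk, if_pos hk, ih seen]
      refine List.map_congr_left (fun k hkm => ?_)
      have hne : k ≠ e.1 := fun hc => (pvUniq_mem _ _ _ hkm).2 (hc ▸ hk)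
      simp [pvSel, Ne.symm hne]
    · rw [if_neg hk, if_neg hk, ih (e.1 :: seen), List.map_cons]
      congr 1
      · simp [pvSel]
      · refine List.map_congr_left (fun k hkm => ?_)
        have hne : k ≠ e.1 := by
          intro hc
          exact (pvUniq_mem _ _ _ hkm).2 (by simp [hc])
        simp [pvSel, Ne.symm hne]

-- the closed form of A's accumulation loop
lemma pvGather_spec (evs : List (Int × Int)) (m : PySem.Dict Int (List Int))
    (hm : m.keys.Nodup) :
    (pvGather evs m).items =
      m.items.map (fun kv => (kv.1, kv.2 ++ pvSel kv.1 evs)) ++ pvGrp m.keys evs := by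
  induction evs generalizing m with
  | nil => simp [pvGather, pvSel, pvGrp]
  | cons e evs ih =>
    have step : pvGather (e :: evs) m =
        pvGather evs (m.insert e.1 (m.getD e.1 [] ++ [e.2])) := rfl
    by_cases hc : m.contains e.1 = true
    · have hmem : e.1 ∈ m.keys := (PySem.Dict.contains_iff_mem_keys m e.1).1 hc
      rw [step, ih _ (PySem.Dict.nodup_keys_insert _ _ _ hm),
        PySem.Dict.items_insert_of_contains m _ hc,
        PySem.Dict.keys_insert_of_contains m _ hc, List.map_map]
      have hgrp : pvGrp m.keys (e :: evs) = pvGrp m.keys evs := by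
        simp [pvGrp, hmem]
      rw [hgrp]
      congr 1
      refine List.map_congr_left (fun p hp => ?_)
      by_cases hpe : p.1 = e.1
      · have hget : m.getD e.1 [] = p.2 := by
          have : (e.1, p.2) ∈ m.items := by
            have : p = (e.1, p.2) := by
              rw [← hpe]
            rw [← this]; exact hp
          exact PySem.Dict.getD_of_mem_items m this hm []
        simp only [Function.comp_apply, hpe, beq_self_eq_true, if_pos, hget]
        simp [pvSel, List.append_assoc]
      · simp only [Function.comp_apply]
        rw [if_neg (by simp [hpe])]
        simp [pvSel, Ne.symm hpe]
    · have hc' : m.contains e.1 = false := by simpa using hc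
      have hmem : e.1 ∉ m.keys := fun h =>
        (by simp [hc'] : ¬ m.contains e.1 = true) ((PySem.Dict.contains_iff_mem_keys m e.1).2 h)
      rw [step, ih _ (PySem.Dict.nodup_keys_insert _ _ _ hm),
        PySem.Dict.items_insert_of_not_contains m _ hc',
        PySem.Dict.keys_insert_of_not_contains m _ hc',
        PySem.Dict.getD_of_not_contains m _ hc']
      have hgrp : pvGrp m.keys (e :: evs) =
          (e.1, e.2 :: pvSel e.1 evs) :: pvGrp (e.1 :: m.keys) evs := by
        simp [pvGrp, hmem]
      rw [hgrp, List.map_append,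
        pvGrp_congr (m.keys ++ [e.1]) (e.1 :: m.keys) evs
          (by intro x; simp only [List.mem_append, List.mem_cons]; tauto)]
      have hmap : m.items.map (fun kv => (kv.1, kv.2 ++ pvSel kv.1 (e :: evs))) =
          m.items.map (fun kv => (kv.1, kv.2 ++ pvSel kv.1 evs)) := by
        refine List.map_congr_left (fun p hp => ?_)
        have hpe : p.1 ≠ e.1 := by
          intro h
          exact hmem (h ▸ PySem.Dict.mem_keys_of_mem_items m hp)
        simp [pvSel, Ne.symm hpe]
      rw [hmap]
      simp [pvSel]

-- A's conversion loop (`pms[k] = set(v)` over the items) maps Set.ofList over the values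
lemma pvConv_spec (l pre : List (Int × List Int)) (m : PySem.Dict Int (List Int))
    (hm : m.keys.Nodup) (hi : m.items = pre ++ l) :
    (l.foldl (fun m kv => m.insert kv.1 (PySem.Set.ofList kv.2)) m).items =
      pre ++ l.map (fun kv => (kv.1, PySem.Set.ofList kv.2)) := by
  induction l generalizing pre m with
  | nil => simpa using hi
  | cons kv l ih =>
    have hkmem : kv ∈ m.items := by rw [hi]; simp
    have hc : m.contains kv.1 = true :=
      (PySem.Dict.contains_iff_mem_keys m kv.1).2 (PySem.Dict.mem_keys_of_mem_items m hkmem)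
    have hkeys : m.keys = (pre ++ kv :: l).map Prod.fst := by
      rw [← hi]; rfl
    have hnd : ((pre ++ kv :: l).map Prod.fst).Nodup := hkeys ▸ hm
    simp only [List.map_append, List.map_cons] at hnd
    have hpre : ∀ p ∈ pre, p.1 ≠ kv.1 := by
      intro p hp hpe
      exact (List.nodup_append.1 hnd).2.2 p.1 (List.mem_map_of_mem hp) kv.1
        List.mem_cons_self hpe
    have hl : ∀ p ∈ l, p.1 ≠ kv.1 := by
      intro p hp hpe
      have h2 := (List.nodup_append.1 hnd).2.1
      rw [List.nodup_cons] at h2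
      exact h2.1 (hpe ▸ List.mem_map_of_mem hp)
    have hitems : (m.insert kv.1 (PySem.Set.ofList kv.2)).items =
        (pre ++ [(kv.1, PySem.Set.ofList kv.2)]) ++ l := by
      rw [PySem.Dict.items_insert_of_contains m _ hc, hi]
      have h1 : pre.map (fun p => if (p.1 == kv.1) = true then (kv.1, PySem.Set.ofList kv.2) else p)
          = pre := by
        refine (List.map_congr_left (fun p hp => ?_)).trans (List.map_id _)
        simp [hpre p hp]
      have h2 : l.map (fun p => if (p.1 == kv.1) = true then (kv.1, PySem.Set.ofList kv.2) else p)
          = l := by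
        refine (List.map_congr_left (fun p hp => ?_)).trans (List.map_id _)
        simp [hl p hp]
      simp only [List.map_append, List.map_cons, beq_self_eq_true, if_pos, h1, h2]
      simp [List.append_assoc]
    have hm' : (m.insert kv.1 (PySem.Set.ofList kv.2)).keys.Nodup :=
      PySem.Dict.nodup_keys_insert _ _ _ hm
    have := ih (pre ++ [(kv.1, PySem.Set.ofList kv.2)]) _ hm' hitems
    simpa [List.append_assoc] using this

lemma pvSel_flatMap {β : Type} (k : Int) (l : List β) (g : β → List (Int × Int)) :
    pvSel k (l.flatMap g) = l.flatMap (fun x => pvSel k (g x)) := by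
  induction l with
  | nil => simp [pvSel]
  | cons x xs ih => simp [List.flatMap_cons, pvSel_append, ih]

lemma pvFlatMap_keys (k : Int) (l : List (Int × List Int))
    (h : ∀ q ∈ l, q.1 ≠ k) :
    l.flatMap (fun q => pvSel k [(k, q.1), (q.1, k)]) = l.map Prod.fst := by
  induction l with
  | nil => simp
  | cons q l ih =>
    rw [List.flatMap_cons, List.map_cons, ih (fun r hr => h r (List.mem_cons_of_mem _ hr))]
    have hq : q.1 ≠ k := h q List.mem_cons_self
    simp [pvSel, hq]

lemma pvFlatMap_ite (k x : Int) (l : List (Int × List Int))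
    (h : ∀ q ∈ l, pvSel k [(x, q.1), (q.1, x)] = if q.1 == k then [x] else []) :
    l.flatMap (fun q => pvSel k [(x, q.1), (q.1, x)]) =
      (l.filter (fun q => q.1 == k)).map (fun _ => x) := by
  induction l with
  | nil => simp
  | cons q l ih =>
    rw [List.flatMap_cons, ih (fun r hr => h r (List.mem_cons_of_mem _ hr)),
      h q List.mem_cons_self, List.filter_cons]
    by_cases hq : (q.1 == k) = true <;> simp [hq]

lemma pvSel_nil_of_not_mem (items : List (Int × List Int)) (k : Int)
    (h : k ∉ items.map Prod.fst) : pvSel k (pvEvents items) = [] := by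
  unfold pvSel
  rw [List.filter_eq_nil_iff.2, List.map_nil]
  intro e he
  simp only [beq_iff_eq]
  intro hc
  exact h (hc ▸ pvEvents_keys_sub items e he)

lemma pvKeyFilter (l : List (Int × List Int)) (hnd : (l.map Prod.fst).Nodup) (k : Int)
    (v : List Int) (hin : (k, v) ∈ l) : l.filter (fun q => q.1 == k) = [(k, v)] := by
  induction l with
  | nil => simp at hin
  | cons p rest ih =>
    simp only [List.map_cons, List.nodup_cons] at hnd
    obtain ⟨hh, hndr⟩ := hnd
    rcases List.mem_cons.1 hin with hp | hin'
    · cases hp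
      rw [List.filter_cons]
      simp only [beq_self_eq_true, if_pos]
      rw [List.filter_eq_nil_iff.2, List.cons.injEq]
      · exact ⟨rfl, rfl⟩
      · intro q hq
        simp only [beq_iff_eq]
        intro hc
        have hqm : q.1 ∈ rest.map Prod.fst := List.mem_map_of_mem hq
        exact hh (hc ▸ hqm)
    · rw [List.filter_cons]
      have hpk : (p.1 == k) = false := by
        simp only [beq_eq_false_iff_ne, ne_eq]
        intro hc
        apply hh
        rw [hc]
        exact List.mem_map_of_mem hin'
      rw [hpk, if_neg Bool.false_ne_true]
      exact ih hndr hin'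

-- per-key value: the events of key k are exactly B's partner list of k's entry
lemma pvSel_events (items : List (Int × List Int)) (hnd : (items.map Prod.fst).Nodup)
    (k : Int) (v : List Int) (hin : (k, v) ∈ items) :
    pvSel k (pvEvents items) = pvNbrList items (k, v) := by
  induction items with
  | nil => simp at hin
  | cons p rest ih =>
    simp only [List.map_cons, List.nodup_cons] at hnd
    obtain ⟨hh, hndr⟩ := hnd
    rw [pvEvents_cons, pvSel_append, pvSel_flatMap]
    rcases List.mem_cons.1 hin with hp | hin'
    · cases hp
      have hflat : (rest.filter (pvMat (k, v))).flatMap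
            (fun q => pvSel k [((k, v).1, q.1), (q.1, (k, v).1)]) =
          (rest.filter (pvMat (k, v))).map Prod.fst := by
        refine pvFlatMap_keys _ _ (fun q hq => ?_)
        intro hc
        have hqm : q.1 ∈ rest.map Prod.fst :=
          List.mem_map_of_mem (List.mem_of_mem_filter hq)
        exact hh (hc ▸ hqm)
      have hnil : pvSel k (pvEvents rest) = [] := pvSel_nil_of_not_mem _ _ hh
      rw [hflat, hnil, List.append_nil]
      unfold pvNbrList
      rw [List.filter_cons]
      have hself : (((k, v).1 != (k, v).1 && (PySem.Set.inter (k, v).2 (k, v).2 != []))) = false := by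
        simp
      rw [hself, if_neg Bool.false_ne_true]
      congr 1
      refine List.filter_congr (fun q hq => ?_)
      have hqk : (q.1 != (k, v).1) = true := by
        simp only [bne_iff_ne, ne_eq]
        intro hc
        have hqm : q.1 ∈ rest.map Prod.fst := List.mem_map_of_mem hq
        exact hh (hc ▸ hqm)
      rw [hqk, Bool.true_and]
      rfl
    · have hpk : p.1 ≠ k := by
        intro hc
        apply hh
        rw [hc]
        exact List.mem_map_of_mem hin'
      have hstep : (rest.filter (pvMat p)).flatMap (fun q => pvSel k [(p.1, q.1), (q.1, p.1)]) =
          (if pvMat p (k, v) then [p.1] else []) := by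
        have h1 : (rest.filter (pvMat p)).flatMap (fun q => pvSel k [(p.1, q.1), (q.1, p.1)]) =
            ((rest.filter (pvMat p)).filter (fun q => q.1 == k)).map (fun _ => p.1) := by
          refine pvFlatMap_ite _ _ _ (fun q hq => ?_)
          by_cases hqk : q.1 = k <;> simp [pvSel, hpk, hqk]
        have h2 : (rest.filter (pvMat p)).filter (fun q => q.1 == k) =
            (rest.filter (fun q => q.1 == k)).filter (pvMat p) := by
          rw [List.filter_filter, List.filter_filter]
          exact List.filter_congr (fun q _ => Bool.and_comm _ _)
        rw [h1, h2, pvKeyFilter rest hndr k v hin']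
        by_cases hmv : pvMat p (k, v) = true <;> simp [hmv]
      rw [hstep, ih hndr hin']
      unfold pvNbrList
      rw [List.filter_cons]
      have hpk' : (p.1 != (k, v).1) = true := by simp [hpk]
      have hpred : ((p.1 != (k, v).1 && (PySem.Set.inter (k, v).2 p.2 != []))) = pvMat p (k, v) := by
        rw [hpk', Bool.true_and]
        exact pvMat_symm (k, v) p
      rw [hpred]
      by_cases hmv : pvMat p (k, v) = true <;> simp [hmv]

-- key-injectivity of an association list with distinct keys
lemma pvKeyInj (l : List (Int × List Int)) (hnd : (l.map Prod.fst).Nodup)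
    {x y : Int × List Int} (hx : x ∈ l) (hy : y ∈ l) (he : y.1 = x.1) : y = x := by
  have hyf : y ∈ l.filter (fun q => q.1 == x.1) := List.mem_filter.2 ⟨hy, by simp [he]⟩
  rw [pvKeyFilter l hnd x.1 x.2 (by simpa using hx)] at hyf
  simpa using hyf

lemma pvUniqFlat_in (x : Int) (bs : List Int) :
    ∀ seen, x ∈ seen → pvUniq seen (bs.flatMap (fun b => [x, b])) = pvUniq seen bs := by
  induction bs with
  | nil => intro seen _; rfl
  | cons b bs ih =>
    intro seen hx
    simp only [List.flatMap_cons, List.cons_append, List.nil_append, pvUniq, if_pos hx]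
    by_cases hb : b ∈ seen
    · rw [if_pos hb, if_pos hb, ih seen hx]
    · rw [if_neg hb, if_neg hb, ih (b :: seen) (List.mem_cons_of_mem _ hx)]

lemma pvUniqFlat (x : Int) (bs : List Int) (hx : x ∉ bs) :
    ∀ seen, pvUniq seen (bs.flatMap (fun b => [x, b])) =
      pvUniq seen (if bs = [] then [] else x :: bs) := by
  cases bs with
  | nil => intro seen; rfl
  | cons b bs =>
    intro seen
    have hxb : x ≠ b := fun h => hx (by simp [h])
    have hxbs : x ∉ bs := fun h => hx (List.mem_cons_of_mem _ h)
    simp only [List.flatMap_cons, List.cons_append, List.nil_append, if_neg (by simp : ¬ b :: bs = [])]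
    simp only [pvUniq]
    by_cases hxs : x ∈ seen
    · rw [if_pos hxs, if_pos hxs]
      by_cases hb : b ∈ seen
      · rw [if_pos hb, if_pos hb, pvUniqFlat_in x bs seen hxs]
      · rw [if_neg hb, if_neg hb, pvUniqFlat_in x bs (b :: seen) (List.mem_cons_of_mem _ hxs)]
    · rw [if_neg hxs, if_neg hxs]
      have hbx : (b ∈ x :: seen) ↔ (b ∈ seen) := by
        simp only [List.mem_cons]
        constructor
        · rintro (rfl | h)
          · exact absurd rfl (by exact fun h => hxb h.symm)
          · exact h
        · exact Or.inr
      by_cases hb : b ∈ seen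
      · rw [if_pos (hbx.2 hb), if_pos (hbx.2 hb),
          pvUniqFlat_in x bs (x :: seen) List.mem_cons_self]
      · rw [if_neg (fun h => hb (hbx.1 h)), if_neg (fun h => hb (hbx.1 h)),
          pvUniqFlat_in x bs (b :: x :: seen) (List.mem_cons_of_mem _ List.mem_cons_self)]

-- pvUniq over a duplicate-free list is a filter
lemma pvUniq_nodup (bs : List Int) (hnd : bs.Nodup) :
    ∀ seen, pvUniq seen bs = bs.filter (fun b => decide (b ∉ seen)) := by
  induction bs with
  | nil => intro seen; rfl
  | cons b bs ih =>
    intro seen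
    rw [List.nodup_cons] at hnd
    simp only [pvUniq, List.filter_cons]
    by_cases hb : b ∈ seen
    · rw [if_pos hb]
      simp only [hb, not_true_eq_false, decide_false, if_neg Bool.false_ne_true]
      exact ih hnd.2 seen
    · rw [if_neg hb]
      simp only [hb, not_false_eq_true, decide_true, if_pos]
      rw [ih hnd.2 (b :: seen)]
      congr 1
      refine List.filter_congr (fun x hx => ?_)
      have : x ≠ b := fun hc => hnd.1 (hc ▸ hx)
      simp [this, List.mem_cons]

-- a filtered list splits at a predicate when no "later Q" follows an "earlier non-Q"
lemma pvSplit {α : Type} (l : List α) (A Q : α → Bool)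
    (h : l.Pairwise (fun a b => A a = true → Q a = false → A b = true → Q b = false)) :
    l.filter A = l.filter (fun x => A x && Q x) ++ l.filter (fun x => A x && !Q x) := by
  induction l with
  | nil => rfl
  | cons x t ih =>
    rw [List.pairwise_cons] at h
    simp only [List.filter_cons]
    by_cases hA : A x = true
    · by_cases hQ : Q x = true
      · simp only [hA, hQ, Bool.and_self, if_pos, Bool.not_true, Bool.and_false,
          if_neg Bool.false_ne_true]
        rw [ih h.2]
        rfl
      · have hQ' : Q x = false := by simpa using hQ
        have hnil : t.filter (fun y => A y && Q y) = [] := by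
          rw [List.filter_eq_nil_iff]
          intro y hy
          simp only [Bool.and_eq_true, not_and]
          intro hAy
          simp [h.1 y hy hA hQ' hAy]
        rw [ih h.2, hnil]
        simp [hA, hQ']
    · have hA' : A x = false := by simpa using hA
      simp only [hA', Bool.false_and, if_neg Bool.false_ne_true]
      exact ih h.2

-- unpack pvNoInvB into its propositional form
lemma pvNoInv_spec (full : List (Int × List Int)) (hni : pvNoInvB full = true)
    (i j k : Nat) (hij : i < j) (hjk : j < k) (hk : k < full.length)
    (hik : pvR full[i]! full[k]! = true)
    (hjm : ∃ l, l < full.length ∧ pvR full[j]! full[l]! = true) :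
    ∃ l, l ≤ i ∧ pvR full[l]! full[j]! = true := by
  unfold pvNoInvB at hni
  simp only [List.all_eq_true, List.mem_range] at hni
  have h := hni k hk j hjk i hij
  rw [Bool.or_eq_true, Bool.or_eq_true] at h
  rcases h with (h | h) | h
  · rw [hik] at h
    exact absurd h (by simp)
  · exfalso
    obtain ⟨l, hl, hpl⟩ := hjm
    have hany : (List.range full.length).any (fun l => pvR full[j]! full[l]!) = true := by
      rw [List.any_eq_true]
      exact ⟨l, List.mem_range.2 hl, hpl⟩
    rw [hany] at h
    exact absurd h (by simp)
  · rw [List.any_eq_true] at h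
    obtain ⟨l, hl, hpl⟩ := h
    exact ⟨l, by simpa using Nat.lt_succ_iff.1 (List.mem_range.1 hl), hpl⟩

-- B's conditional insertion loop over fresh distinct keys appends the kept entries
lemma pvBfold_spec (f : (Int × List Int) → List Int) :
    ∀ (l : List (Int × List Int)) (m : PySem.Dict Int (List Int)),
      (∀ p ∈ l, m.contains p.1 = false) → (l.map Prod.fst).Nodup →
      (l.foldl (fun m p => if f p ≠ [] then m.insert p.1 (f p) else m) m).items =
        m.items ++ (l.filter (fun p => f p ≠ [])).map (fun p => (p.1, f p)) := by
  intro l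
  induction l with
  | nil => intro m _ _; simp
  | cons p t ih =>
    intro m hfresh hnd
    rw [List.map_cons, List.nodup_cons] at hnd
    rw [List.foldl_cons, List.filter_cons]
    by_cases hf : f p = []
    · rw [if_neg (by simpa using hf)]
      have hd : (decide (f p ≠ []) : Bool) = false := by simp [hf]
      rw [hd, if_neg Bool.false_ne_true,
        ih _ (fun q hq => hfresh q (List.mem_cons_of_mem _ hq)) hnd.2]
    · rw [if_pos hf]
      have hd : (decide (f p ≠ []) : Bool) = true := by simp [hf]
      have hfresh' : ∀ q ∈ t, (m.insert p.1 (f p)).contains q.1 = false := by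
        intro q hq
        rw [PySem.Dict.contains_insert]
        have hq1 : q.1 ≠ p.1 := fun hc => hnd.1 (hc ▸ List.mem_map_of_mem hq)
        simp [hq1, hfresh q (List.mem_cons_of_mem _ hq)]
      rw [hd, if_pos rfl, ih _ hfresh' hnd.2,
        PySem.Dict.items_insert_of_not_contains m _ (hfresh p List.mem_cons_self)]
      simp [List.append_assoc]

-- getElem! on a decomposed list
lemma pvGetBang (l1 l2 : List (Int × List Int)) (x : Int × List Int) :
    (l1 ++ x :: l2)[l1.length]! = x := by
  have h : l1.length < (l1 ++ x :: l2).length := by simp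
  rw [getElem!_pos (l1 ++ x :: l2) l1.length h]
  simp

lemma pvGetBang2 (l1 l2 : List (Int × List Int)) (x : Int × List Int) (n : Nat)
    (hn : n < l2.length) : (l1 ++ x :: l2)[l1.length + 1 + n]! = l2[n] := by
  have h : l1.length + 1 + n < (l1 ++ x :: l2).length := by simp; omega
  rw [getElem!_pos (l1 ++ x :: l2) (l1.length + 1 + n) h]
  rw [List.getElem_append_right (by omega)]
  simp only [List.getElem_cons]
  have : l1.length + 1 + n - l1.length ≠ 0 := by omega
  rw [dif_neg this]
  congr 1
  omega

-- the main order lemma: under Pre_, A's first-occurrence event-key order is the input key order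
lemma pvMain (full : List (Int × List Int)) (hnd : (full.map Prod.fst).Nodup)
    (hni : pvNoInvB full = true) :
    ∀ (suf pre : List (Int × List Int)) (seen : List Int), full = pre ++ suf →
      (∀ r ∈ suf, (r.1 ∈ seen ↔ ∃ q ∈ pre, pvR q r = true)) →
      pvUniq seen ((pvEvents suf).map Prod.fst) =
        (suf.filter (fun r => full.any (fun q => pvR r q) && decide (r.1 ∉ seen))).map Prod.fst := by
  intro suf
  induction suf with
  | nil => intro pre seen _ _; rfl
  | cons p tail ih =>
    intro pre seen hfull hinv
    -- nodup bookkeeping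
    have hnd' : ((pre ++ p :: tail).map Prod.fst).Nodup := hfull ▸ hnd
    rw [List.map_append, List.nodup_append] at hnd'
    have hcnd : ((p :: tail).map Prod.fst).Nodup := hnd'.2.1
    rw [List.map_cons, List.nodup_cons] at hcnd
    have hptail : p.1 ∉ tail.map Prod.fst := hcnd.1
    have htailnd : (tail.map Prod.fst).Nodup := hcnd.2
    set qs := tail.filter (fun q => pvMat p q) with hqs
    set bs := qs.map Prod.fst with hbs
    have hbs_sub : bs.Sublist (tail.map Prod.fst) := List.Sublist.map Prod.fst List.filter_sublist
    have hbs_nodup : bs.Nodup := hbs_sub.nodup htailnd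
    have hpbs : p.1 ∉ bs := fun h => hptail (hbs_sub.mem h)
    -- the events of the head, as flat keys
    have step1 : (pvEvents (p :: tail)).map Prod.fst =
        bs.flatMap (fun b => [p.1, b]) ++ (pvEvents tail).map Prod.fst := by
      rw [pvEvents_cons, List.map_append]
      congr 1
      rw [List.map_flatMap, hbs, hqs, List.flatMap_map]
      rfl
    -- prefix evaluation
    have prefixEq : pvUniq seen (bs.flatMap (fun b => [p.1, b])) =
        (if bs ≠ [] ∧ p.1 ∉ seen then [p.1] else []) ++ bs.filter (fun b => decide (b ∉ seen)) := by
      rw [pvUniqFlat p.1 bs hpbs seen]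
      by_cases hbs0 : bs = []
      · simp [hbs0, pvUniq]
      · rw [if_neg hbs0]
        simp only [pvUniq]
        by_cases hps : p.1 ∈ seen
        · rw [if_pos hps, if_neg (by simp [hps]), List.nil_append, pvUniq_nodup bs hbs_nodup]
        · rw [if_neg hps, if_pos ⟨hbs0, hps⟩, List.singleton_append, pvUniq_nodup bs hbs_nodup]
          congr 1
          refine List.filter_congr (fun b hb => ?_)
          have : b ≠ p.1 := fun hc => hpbs (hc ▸ hb)
          simp [List.mem_cons, this]
    -- membership in the grown seen list
    have hseen2 : ∀ r ∈ tail,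
        (r.1 ∈ bs.flatMap (fun b => [p.1, b]) ++ seen ↔ pvR p r = true ∨ r.1 ∈ seen) := by
      intro r hr
      have hrp : r.1 ≠ p.1 := fun hc => hptail (hc ▸ List.mem_map_of_mem hr)
      rw [List.mem_append, List.mem_flatMap]
      constructor
      · rintro (⟨b, hbmem, hrb⟩ | h)
        · rcases List.mem_cons.1 hrb with h1 | h1
          · exact absurd h1 hrp
          · rw [List.mem_singleton] at h1
            rw [hbs] at hbmem
            obtain ⟨q, hq, hq1⟩ := List.mem_map.1 hbmem
            rw [hqs] at hq
            have hq2 : q ∈ tail := List.mem_of_mem_filter hq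
            have hqr : q = r := pvKeyInj tail htailnd hr hq2 (by rw [hq1, h1])
            have hmat : pvMat p q = true := List.of_mem_filter hq
            left
            rw [pvR_eq_pvMat p r hrp, ← hqr]
            exact hmat
        · exact Or.inr h
      · rintro (h | h)
        · left
          have hmat : pvMat p r = true := by rw [← pvR_eq_pvMat p r hrp]; exact h
          have hrqs : r ∈ qs := by rw [hqs]; exact List.mem_filter.2 ⟨hr, hmat⟩
          exact ⟨r.1, List.mem_map_of_mem hrqs, by simp⟩
        · exact Or.inr h
    -- invariant for the tail
    have hinv2 : ∀ r ∈ tail,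
        (r.1 ∈ bs.flatMap (fun b => [p.1, b]) ++ seen ↔ ∃ q ∈ pre ++ [p], pvR q r = true) := by
      intro r hr
      rw [hseen2 r hr]
      constructor
      · rintro (h | h)
        · exact ⟨p, by simp, h⟩
        · obtain ⟨q, hq, hpq⟩ := (hinv r (List.mem_cons_of_mem _ hr)).1 h
          exact ⟨q, List.mem_append_left _ hq, hpq⟩
      · rintro ⟨q, hq, hpq⟩
        rcases List.mem_append.1 hq with h1 | h1
        · exact Or.inr ((hinv r (List.mem_cons_of_mem _ hr)).2 ⟨q, h1, hpq⟩)
        · rw [List.mem_singleton] at h1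
          exact Or.inl (h1 ▸ hpq)
    have hIH := ih (pre ++ [p]) (bs.flatMap (fun b => [p.1, b]) ++ seen)
      (by simpa using hfull) hinv2
    -- rewrite the membership test inside the IH's filter
    have hIH' : pvUniq (bs.flatMap (fun b => [p.1, b]) ++ seen) ((pvEvents tail).map Prod.fst) =
        (tail.filter (fun r =>
          (full.any (fun q => pvR r q) && decide (r.1 ∉ seen)) && !(pvR p r))).map Prod.fst := by
      rw [hIH]
      congr 1
      refine List.filter_congr (fun r hr => ?_)
      have hmem := hseen2 r hr
      by_cases h1 : pvR p r = true
      · simp [hmem, h1]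
      · have h1' : pvR p r = false := by simpa using h1
        by_cases h2 : r.1 ∈ seen
        · simp [hmem, h1', h2]
        · simp [hmem, h1', h2]
    -- the head's filter condition
    have hcondp : ((full.any (fun q => pvR p q) && decide (p.1 ∉ seen)) = true) ↔
        (bs ≠ [] ∧ p.1 ∉ seen) := by
      rw [Bool.and_eq_true, decide_eq_true_iff, List.any_eq_true]
      constructor
      · rintro ⟨⟨q, hq, hpq⟩, hps⟩
        refine ⟨?_, hps⟩
        rw [hfull] at hq
        rcases List.mem_append.1 hq with h1 | h1
        · exfalso
          apply hps
          exact (hinv p List.mem_cons_self).2 ⟨q, h1, by rw [pvR_symm]; exact hpq⟩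
        · rcases List.mem_cons.1 h1 with h2 | h2
          · rw [h2, pvR_self] at hpq
            exact absurd hpq (by simp)
          · have hq1 : q.1 ≠ p.1 := fun hc => hptail (hc ▸ List.mem_map_of_mem h2)
            have hmat : pvMat p q = true := by rw [← pvR_eq_pvMat p q hq1]; exact hpq
            have hqmem : q ∈ qs := by rw [hqs]; exact List.mem_filter.2 ⟨h2, hmat⟩
            intro hc
            have h0 : qs.map Prod.fst = [] := by rw [← hbs]; exact hc
            have h3 : qs = [] := List.map_eq_nil_iff.1 h0
            rw [h3] at hqmem
            exact absurd hqmem List.not_mem_nil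
      · rintro ⟨hbs0, hps⟩
        refine ⟨?_, hps⟩
        obtain ⟨b, hbm⟩ := List.exists_mem_of_ne_nil bs hbs0
        rw [hbs] at hbm
        obtain ⟨q, hq, -⟩ := List.mem_map.1 hbm
        rw [hqs] at hq
        have hq2 : q ∈ tail := List.mem_of_mem_filter hq
        have hmat : pvMat p q = true := List.of_mem_filter hq
        have hq1 : q.1 ≠ p.1 := fun hc => hptail (hc ▸ List.mem_map_of_mem hq2)
        refine ⟨q, ?_, by rw [pvR_eq_pvMat p q hq1]; exact hmat⟩
        rw [hfull]
        exact List.mem_append_right _ (List.mem_cons_of_mem _ hq2)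
    -- pairwise: no later matched-by-p entry after an earlier matched entry not matched by p
    have hpair : tail.Pairwise (fun a b =>
        (full.any (fun q => pvR a q) && decide (a.1 ∉ seen)) = true → pvR p a = false →
        (full.any (fun q => pvR b q) && decide (b.1 ∉ seen)) = true → pvR p b = false) := by
      rw [List.pairwise_iff_getElem]
      intro i j hi hj hij hPa hQa hPb
      by_contra hQb
      have hQb' : pvR p tail[j] = true := by simpa using hQb
      rw [Bool.and_eq_true, decide_eq_true_iff, List.any_eq_true] at hPa hPb
      have hlen : full.length = pre.length + 1 + tail.length := by rw [hfull]; simp; omega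
      have hgi : full[pre.length + 1 + i]! = tail[i] := by rw [hfull]; exact pvGetBang2 pre tail p i hi
      have hgj : full[pre.length + 1 + j]! = tail[j] := by rw [hfull]; exact pvGetBang2 pre tail p j hj
      have hgp : full[pre.length]! = p := by rw [hfull]; exact pvGetBang pre tail p
      have hik : pvR full[pre.length]! full[pre.length + 1 + j]! = true := by
        rw [hgp, hgj]; exact hQb'
      have hjm : ∃ l, l < full.length ∧ pvR full[pre.length + 1 + i]! full[l]! = true := by
        obtain ⟨q, hq, hpq⟩ := hPa.1
        obtain ⟨l, hl, he⟩ := List.mem_iff_getElem.1 hq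
        refine ⟨l, hl, ?_⟩
        rw [hgi, getElem!_pos full l hl, he]
        exact hpq
      obtain ⟨l, hl, hpl⟩ := pvNoInv_spec full hni (pre.length) (pre.length + 1 + i)
        (pre.length + 1 + j) (by omega) (by omega) (by omega) hik hjm
      rw [hgi] at hpl
      rcases Nat.lt_or_ge l pre.length with hlt | hge
      · -- a partner of tail[i] inside pre: contradicts tail[i].1 ∉ seen
        have hfl : full[l]! = pre[l] := by
          have h1 : l < full.length := by omega
          rw [getElem!_pos full l h1]
          exact (getElem_congr_coll hfull).trans (List.getElem_append_left hlt)
        rw [hfl] at hpl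
        have : tail[i].1 ∈ seen :=
          (hinv tail[i] (List.mem_cons_of_mem _ (tail.getElem_mem hi))).2
            ⟨pre[l], pre.getElem_mem hlt, hpl⟩
        exact hPa.2 this
      · -- l = pre.length: p itself is a partner of tail[i], contradicting hQa
        have hle : l = pre.length := by omega
        rw [hle, hgp] at hpl
        rw [hpl] at hQa
        exact absurd hQa (by simp)
    -- the filtered keys of the matched-by-p entries are exactly bs minus seen
    have hbsf : bs.filter (fun b => decide (b ∉ seen)) =
        (tail.filter (fun r =>
          (full.any (fun q => pvR r q) && decide (r.1 ∉ seen)) && pvR p r)).map Prod.fst := by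
      rw [hbs, List.filter_map, hqs, List.filter_filter]
      congr 1
      refine List.filter_congr (fun r hr => ?_)
      have hrp : r.1 ≠ p.1 := fun hc => hptail (hc ▸ List.mem_map_of_mem hr)
      by_cases hm : pvMat p r = true
      · have hR : pvR p r = true := by rw [pvR_eq_pvMat p r hrp]; exact hm
        have hany : full.any (fun q => pvR r q) = true := by
          rw [List.any_eq_true]
          refine ⟨p, ?_, by rw [pvR_symm]; exact hR⟩
          rw [hfull]
          exact List.mem_append_right _ List.mem_cons_self
        simp [Function.comp, hm, hR, hany]
      · have hm' : pvMat p r = false := by simpa using hm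
        have hR : pvR p r = false := by rw [pvR_eq_pvMat p r hrp]; exact hm'
        simp [Function.comp, hm', hR]
    -- assemble
    rw [step1, pvUniq_append, prefixEq, hIH', List.filter_cons]
    rw [pvSplit tail _ _ hpair]
    by_cases hP : (full.any (fun q => pvR p q) && decide (p.1 ∉ seen)) = true
    · rw [if_pos hP, if_pos (hcondp.1 hP), List.map_cons, List.map_append, hbsf]
      simp
    · rw [if_neg hP, if_neg (fun h => hP (hcondp.2 h)), List.map_append, hbsf]
      simp

-- an entry is matched iff B computes a non-empty partner set for it
lemma pvMatched_iff (hashes : List (Int × List Int)) (p : Int × List Int) :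
    (hashes.any (fun q => pvR p q)) = decide (PySem.Set.ofList (pvNbrList hashes p) ≠ []) := by
  rw [Bool.eq_iff_iff, decide_eq_true_iff]
  have h1 : PySem.Set.ofList (pvNbrList hashes p) = [] ↔ pvNbrList hashes p = [] := by
    constructor
    · intro h
      rw [List.eq_nil_iff_forall_not_mem]
      intro x hx
      have : x ∈ PySem.Set.ofList (pvNbrList hashes p) := (PySem.Set.mem_ofList _ _).2 hx
      simp [h] at this
    · intro h; rw [h]; rfl
  rw [ne_eq, h1, List.any_eq_true]
  unfold pvNbrList pvR
  simp [List.filter_eq_nil_iff]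

-- A's main loop, one event at a time
lemma pvAfold (hashes : List (Int × List Int)) :
    (pvCombos2 hashes).foldl
      (fun m pq =>
        if PySem.Set.inter pq.1.2 pq.2.2 ≠ [] then
          (m.insert pq.1.1 (m.getD pq.1.1 [] ++ [pq.2.1])).insert pq.2.1
            ((m.insert pq.1.1 (m.getD pq.1.1 [] ++ [pq.2.1])).getD pq.2.1 [] ++ [pq.1.1])
        else m)
      (PySem.Dict.empty : PySem.Dict Int (List Int))
    = pvGather (pvEvents hashes) PySem.Dict.empty := by
  rw [PySem.List.foldl_ite_eq_foldl_filter]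
  rw [List.filter_congr (fun pq _ => (by
    rw [Bool.eq_iff_iff]
    simp [pvMat] : (decide (PySem.Set.inter pq.1.2 pq.2.2 ≠ [])) = pvMat pq.1 pq.2))]
  unfold pvEvents pvGather
  rw [List.foldl_flatMap]
  rfl

-- ===== VERDICT (by name: the statement is the Claim_ definition above) =====
theorem match_hashes_spec : Claim_equal_match_hashes := by
  intro hashes _ hpre
  obtain ⟨hnd, hni⟩ := hpre
  show match_hashes hashes = match_hashes_alt hashes
  -- characterize A
  have hknd : (pvGather (pvEvents hashes) (PySem.Dict.empty : PySem.Dict Int (List Int))).keys.Nodup := by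
    unfold pvGather
    exact PySem.Dict.nodup_keys_foldl_insert_key (pvEvents hashes) (fun e => e.1)
      (fun d e => d.getD e.1 [] ++ [e.2]) PySem.Dict.empty PySem.Dict.nodup_keys_empty
  have hitems : (pvGather (pvEvents hashes) (PySem.Dict.empty : PySem.Dict Int (List Int))).items =
      pvGrp [] (pvEvents hashes) := by
    rw [pvGather_spec _ _ PySem.Dict.nodup_keys_empty]
    rfl
  have hA : match_hashes hashes =
      (pvGrp [] (pvEvents hashes)).map (fun kv => (kv.1, PySem.Set.ofList kv.2)) := by
    simp only [match_hashes]
    rw [pvAfold hashes, pvConv_spec _ [] _ hknd (by rfl), hitems, List.nil_append]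
  -- characterize B
  have hB : match_hashes_alt hashes =
      (hashes.filter (fun p => PySem.Set.ofList (pvNbrList hashes p) ≠ [])).map
        (fun p => (p.1, PySem.Set.ofList (pvNbrList hashes p))) := by
    show (hashes.foldl
        (fun m p => if PySem.Set.ofList (pvNbrList hashes p) ≠ [] then
          m.insert p.1 (PySem.Set.ofList (pvNbrList hashes p)) else m)
        PySem.Dict.empty).items = _
    rw [pvBfold_spec (fun p => PySem.Set.ofList (pvNbrList hashes p)) hashes PySem.Dict.empty
      (fun p _ => PySem.Dict.contains_empty p.1) hnd]
    rfl
  -- combine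
  have hmain := pvMain hashes hnd hni hashes [] [] rfl (by simp)
  have hfc : hashes.filter (fun r => hashes.any (fun q => pvR r q) && decide (r.1 ∉ ([] : List Int)))
      = hashes.filter (fun p => decide (PySem.Set.ofList (pvNbrList hashes p) ≠ [])) := by
    refine List.filter_congr (fun p _ => ?_)
    rw [pvMatched_iff hashes p]
    simp
  rw [hA, pvGrp_eq_uniq, hmain, hfc, hB, List.map_map, List.map_map]
  refine List.map_congr_left (fun p hp => ?_)
  have hpm : p ∈ hashes := List.mem_of_mem_filter hp
  have hsel : pvSel p.1 (pvEvents hashes) = pvNbrList hashes (p.1, p.2) :=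
    pvSel_events hashes hnd p.1 p.2 (by simpa using hpm)
  simp only [Function.comp_apply, hsel]
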